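-- pv_equiv track=rewrite | github.com/yjwong/open-shrimp | src/open_udang/bash_parse.py | check_compound_safety
-- ===== SOURCE A (Python) =====
-- MAX_SUBCOMMANDS = 50
--
-- _WRITE_COMMANDS = {
--     "rm", "rmdir", "mv", "cp", "mkdir", "touch", "sed", "tee", "dd",
--     "install", "rsync", "chmod", "chown", "chgrp", "ln",
-- }
--
-- def _get_base_command(subcommand: str) -> str | None:
--     """Extract the base command name from a single subcommand string.
--
--     Strips env-var prefixes (``VAR=val cmd``) and leading paths.
--     """
--     words = subcommand.strip().split()
--     for word in words:
--         if "=" in word: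
--             continue  # Skip VAR=val prefixes
--         # Strip leading path
--         return word.rsplit("/", 1)[-1] or None
--     return None
--
-- def _is_cd_command(subcommand: str) -> bool:
--     """Return True if *subcommand* is a ``cd`` command."""
--     return _get_base_command(subcommand) == "cd"
--
-- def _is_git_command(subcommand: str) -> bool:
--     """Return True if *subcommand* is a ``git`` command."""
--     base = _get_base_command(subcommand)
--     return base == "git" or base == "xargs" and "git" in subcommand
--
-- def _is_write_command(subcommand: str) -> bool:
--     """Return True if *subcommand* is a write operation."""
--     base = _get_base_command(subcommand)
--     return base is not None and base in _WRITE_COMMANDS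
--
-- def check_compound_safety(subcommands: list[str]) -> str | None:
--     """Check compound command safety rules.
--
--     Returns an error reason string if the command should require manual
--     approval, or None if it passes all safety checks.
--     """
--     if len(subcommands) > MAX_SUBCOMMANDS:
--         return (
--             f"Command splits into {len(subcommands)} subcommands, "
--             f"too many to safety-check individually"
--         )
--
--     cd_commands = [s for s in subcommands if _is_cd_command(s)]
--
--     if len(cd_commands) > 1:
--         return (
--             "Multiple directory changes in one command require "
--             "approval for clarity"
--         )
--
--     has_cd = len(cd_commands) > 0
--
--     if has_cd:
--         if any(_is_git_command(s) for s in subcommands):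
--             return (
--                 "Compound commands with cd and git require approval "
--                 "to prevent bare repository attacks"
--             )
--         if any(_is_write_command(s) for s in subcommands):
--             return (
--                 "Compound command contains cd with write operation — "
--                 "manual approval required to prevent path resolution bypass"
--             )
--
--     return None
-- ===== SOURCE B (Python) =====
-- MAX_SUBCOMMANDS = 50
--
-- _WRITE_COMMANDS = {
--     "rm", "rmdir", "mv", "cp", "mkdir", "touch", "sed", "tee", "dd",
--     "install", "rsync", "chmod", "chown", "chgrp", "ln",
-- }
--
--
-- def check_compound_safety(subcommands: list[str]) -> str | None:
--     """Single-pass classification: one loop over subcommands computes each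
--     base command exactly once and maintains cd_count / has_git / has_write;
--     the decision chain afterwards is unchanged."""
--     if len(subcommands) > MAX_SUBCOMMANDS:
--         return (
--             f"Command splits into {len(subcommands)} subcommands, "
--             f"too many to safety-check individually"
--         )
--
--     cd_count = 0
--     has_git = False
--     has_write = False
--     for sub in subcommands:
--         base = None
--         for word in sub.strip().split():
--             if "=" not in word:
--                 base = word.rsplit("/", 1)[-1] or None
--                 break
--         if base == "cd":
--             cd_count += 1
--         has_git = has_git or base == "git" or (base == "xargs" and "git" in sub)
--         has_write = has_write or (base is not None and base in _WRITE_COMMANDS)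
--
--     if cd_count > 1:
--         return (
--             "Multiple directory changes in one command require "
--             "approval for clarity"
--         )
--     if cd_count > 0:
--         if has_git:
--             return (
--                 "Compound commands with cd and git require approval "
--                 "to prevent bare repository attacks"
--             )
--         if has_write:
--             return (
--                 "Compound command contains cd with write operation — "
--                 "manual approval required to prevent path resolution bypass"
--             )
--     return None
-- ===== Notes on version B (the rewrite author's own statement) =====
-- stated objective: alternative
-- what changed: Replaced A's three separate scans (the cd filter plus two any() rescans) with a single loop that computes each subcommand's base command exactly once and maintains cd_count/has_git/has_write, followed by the same decision chain.
import Mathlib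
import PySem

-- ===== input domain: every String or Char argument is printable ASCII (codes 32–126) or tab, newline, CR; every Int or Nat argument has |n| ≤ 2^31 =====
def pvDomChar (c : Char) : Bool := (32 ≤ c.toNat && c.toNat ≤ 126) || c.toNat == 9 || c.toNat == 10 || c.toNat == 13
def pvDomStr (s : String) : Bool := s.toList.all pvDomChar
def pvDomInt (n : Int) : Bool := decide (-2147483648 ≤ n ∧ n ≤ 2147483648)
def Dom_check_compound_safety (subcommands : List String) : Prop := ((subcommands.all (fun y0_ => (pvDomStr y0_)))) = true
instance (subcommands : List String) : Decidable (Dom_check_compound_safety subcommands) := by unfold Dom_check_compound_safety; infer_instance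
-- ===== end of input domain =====

-- B replaces A's three scans by one loop computing each base command once; same results, similar cost.

-- ===== PORT A =====
def pvWriteCommands : List String :=
  ["rm", "rmdir", "mv", "cp", "mkdir", "touch", "sed", "tee", "dd",
   "install", "rsync", "chmod", "chown", "chgrp", "ln"]

-- word.rsplit("/", 1)[-1]: ported by hand as the characters after the last '/'
-- (exact: sep is one char, maxsplit 1, and only the last piece is used)
def pvRsplitLast (w : List Char) : List Char :=
  (w.reverse.takeWhile (· ≠ '/')).reverse

-- the for-loop of _get_base_command: first word without '=', returning its base (or None)
def pvBaseLoop : List String → Option String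
  | [] => none
  | w :: ws =>
      if PySem.Str.isIn "=" w then pvBaseLoop ws
      else
        let b := String.mk (pvRsplitLast w.toList)
        if b = "" then none else some b

def pvGetBaseCommand (s : String) : Option String :=
  pvBaseLoop (PySem.Str.split₀ (PySem.Str.strip s))

def pvIsCd (s : String) : Bool := pvGetBaseCommand s == some "cd"

def pvIsGit (s : String) : Bool :=
  let base := pvGetBaseCommand s
  base == some "git" || (base == some "xargs" && PySem.Str.isIn "git" s)

def pvIsWrite (s : String) : Bool :=
  match pvGetBaseCommand s with
  | none => false
  | some b => pvWriteCommands.contains b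

def check_compound_safety (subcommands : List String) : Option String :=
  if subcommands.length > 50 then
    some ("Command splits into " ++ PySem.Int.toStr (subcommands.length : Int) ++
      " subcommands, too many to safety-check individually")
  else
    let cd_commands := subcommands.filter pvIsCd
    if cd_commands.length > 1 then
      some "Multiple directory changes in one command require approval for clarity"
    else
      let has_cd := cd_commands.length > 0
      if has_cd then
        if subcommands.any pvIsGit then
          some "Compound commands with cd and git require approval to prevent bare repository attacks"
        else if subcommands.any pvIsWrite then
          some "Compound command contains cd with write operation — manual approval required to prevent path resolution bypass"
        else none
      else none

-- ===== PORT B =====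
-- Source B's inner loop-with-break: first word without '=' (find?), then its base
def pvBaseOnce (s : String) : Option String :=
  match (PySem.Str.split₀ (PySem.Str.strip s)).find? (fun w => !(PySem.Str.isIn "=" w)) with
  | none => none
  | some w =>
      let b := String.mk ((w.toList.reverse.takeWhile (· ≠ '/')).reverse)
      if b = "" then none else some b

-- the accumulator of Source B's single pass: (cd_count, has_git, has_write)
def pvStep (st : Nat × Bool × Bool) (sub : String) : Nat × Bool × Bool :=
  let base := pvBaseOnce sub
  ((if base == some "cd" then st.1 + 1 else st.1),
   st.2.1 || base == some "git" || (base == some "xargs" && PySem.Str.isIn "git" sub),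
   st.2.2 || (match base with
              | none => false
              | some b => ["rm", "rmdir", "mv", "cp", "mkdir", "touch", "sed", "tee", "dd",
                           "install", "rsync", "chmod", "chown", "chgrp", "ln"].contains b))

def check_compound_safety_alt (subcommands : List String) : Option String :=
  if subcommands.length > 50 then
    some ("Command splits into " ++ PySem.Int.toStr (subcommands.length : Int) ++
      " subcommands, too many to safety-check individually")
  else
    let st := subcommands.foldl pvStep (0, false, false)
    if st.1 > 1 then
      some "Multiple directory changes in one command require approval for clarity"
    else if st.1 > 0 then
      if st.2.1 then
        some "Compound commands with cd and git require approval to prevent bare repository attacks"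
      else if st.2.2 then
        some "Compound command contains cd with write operation — manual approval required to prevent path resolution bypass"
      else none
    else none

-- ===== PRECONDITION & SPEC =====
def Spec_check_compound_safety (subcommands : List String) (out : Option String) : Prop := out = check_compound_safety_alt subcommands
instance (subcommands : List String) (out : Option String) : Decidable (Spec_check_compound_safety subcommands out) := by unfold Spec_check_compound_safety; infer_instance

-- ===== CLAIM (what is proved, stated in full; the proofs are below) =====
def Claim_equal_check_compound_safety : Prop := ∀ (subcommands : List String), Dom_check_compound_safety subcommands → Spec_check_compound_safety subcommands (check_compound_safety subcommands)

-- ===== LEMMAS AND PROOFS =====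

theorem pvBaseOnce_eq (s : String) : pvBaseOnce s = pvGetBaseCommand s := by
  unfold pvBaseOnce pvGetBaseCommand
  generalize PySem.Str.split₀ (PySem.Str.strip s) = ws
  induction ws with
  | nil => rfl
  | cons w ws ih =>
      by_cases h : PySem.Chars.isIn ['='] w.toList = true
      · rw [List.find?_cons_of_neg (p := fun w => !PySem.Str.isIn "=" w) (by simp [h])]
        rw [ih, pvBaseLoop]
        simp [h]
      · rw [List.find?_cons_of_pos (p := fun w => !PySem.Str.isIn "=" w) (by simp [h])]
        rw [pvBaseLoop]
        simp [h, pvRsplitLast]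

set_option maxHeartbeats 1000000 in
theorem pvStep_eq (st : Nat × Bool × Bool) (s : String) :
    pvStep st s = ((if pvIsCd s then st.1 + 1 else st.1),
      st.2.1 || pvIsGit s, st.2.2 || pvIsWrite s) := by
  obtain ⟨c, g, w⟩ := st
  simp only [pvStep, pvBaseOnce_eq, pvIsCd, pvIsGit, pvIsWrite]
  cases hb : pvGetBaseCommand s <;> simp [Bool.or_assoc, pvWriteCommands, List.mem_cons]

theorem pvFold_spec (l : List String) (c : Nat) (g w : Bool) :
    l.foldl pvStep (c, g, w) =
      (c + (l.filter pvIsCd).length, g || l.any pvIsGit, w || l.any pvIsWrite) := by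
  induction l generalizing c g w with
  | nil => simp
  | cons s t ih =>
      simp only [List.foldl_cons, List.filter_cons, List.any_cons, pvStep_eq]
      rw [ih]
      by_cases h : pvIsCd s = true <;>
        simp [h, Bool.or_assoc, Nat.add_comm, Nat.add_left_comm]

theorem check_compound_safety_spec : Claim_equal_check_compound_safety := by
  intro subcommands _
  unfold Spec_check_compound_safety check_compound_safety check_compound_safety_alt
  by_cases hlen : subcommands.length > 50
  · simp [hlen]
  · rw [if_neg hlen, if_neg hlen]
    simp only [pvFold_spec, Nat.zero_add, Bool.false_or]
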